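-- pv_equiv track=rewrite | github.com/HussainAlkhayat/CS540-AI | nqueens.py | convert1Dto2D
-- ===== SOURCE A (Python) =====
-- import copy
--
-- def convert1Dto2D(state):
--     tempState = copy.deepcopy(state)
--     n = len(state)
--     state2D = [[0 for i in range(n)] for j in range(n)]
--     index = 0
--     for queen in state:
--         state2D[queen][index] = 1
--         index += 1
--     return state2D
-- ===== SOURCE B (Python) =====
-- def convert1Dto2D(state):
--     n = len(state)
--     cols = []
--     for q in state:
--         col = [0] * n
--         col[q] = 1
--         cols.append(col)
--     return [list(row) for row in zip(*cols)]
-- ===== Notes on version B (the rewrite author's own statement) =====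
-- stated objective: alternative
-- what changed: Replaces A's zero-initialized n x n grid mutated in place via a running column counter by building one one-hot column per queen and transposing with zip(*cols); no shared grid, no counter, no deepcopy.
import Mathlib
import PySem

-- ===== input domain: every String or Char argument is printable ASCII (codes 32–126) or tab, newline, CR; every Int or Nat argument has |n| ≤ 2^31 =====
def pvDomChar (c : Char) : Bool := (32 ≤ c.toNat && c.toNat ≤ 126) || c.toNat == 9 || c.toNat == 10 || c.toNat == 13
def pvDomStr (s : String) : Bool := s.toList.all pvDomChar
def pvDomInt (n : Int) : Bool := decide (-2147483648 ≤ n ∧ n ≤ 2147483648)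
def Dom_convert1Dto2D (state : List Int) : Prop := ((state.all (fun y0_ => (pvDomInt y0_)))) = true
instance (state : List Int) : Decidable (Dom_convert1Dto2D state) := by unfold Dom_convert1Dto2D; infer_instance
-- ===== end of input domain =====

-- B replaces A's zero-initialized grid mutated in place under a running column counter by
-- building one one-hot column per queen and transposing with zip(*cols); objective: alternative.


-- ===== PORT A =====
-- literal transliteration of A: build an n×n grid of zeros, then scatter: for queen in state,
-- state2D[queen][index] = 1 (negative queen indexes from the end; pySetD/pyGetD are the
-- Python-exact index operations, used in their total form under Pre_, which guarantees InRange).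
-- A's 'tempState = copy.deepcopy(state)' is unused by A and has no observable effect.
def convert1Dto2D (state : List Int) : List (List Int) :=
  let n := state.length
  let state2D := (PySem.List.pyRange 0 n 1).map (fun _ => (PySem.List.pyRange 0 n 1).map (fun _ => (0 : Int)))
  (state.foldl
    (fun (acc : List (List Int) × Int) queen =>
      (PySem.List.pySetD acc.1 queen
        (PySem.List.pySetD (PySem.List.pyGetD acc.1 queen []) acc.2 1), acc.2 + 1))
    (state2D, 0)).1

-- ===== PORT B =====
-- literal transliteration of Source B: one one-hot column per queen (col = [0]*n; col[q] = 1),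
-- then transpose with zip(*cols).  pvZipStar is zip(*cols): rows of heads while no column is
-- exhausted — exact for Python's zip (stops at the shortest column; zip() of no columns is []).
def pvZipStar (cols : List (List Int)) : List (List Int) :=
  if h : cols = [] ∨ cols.any (fun c => c.isEmpty) then []
  else (cols.map (fun c => c.headD 0)) :: pvZipStar (cols.map (fun c => c.tail))
termination_by (cols.headD []).length
decreasing_by
  rw [not_or] at h
  obtain ⟨h1, h2⟩ := h
  cases cols with
  | nil => exact absurd rfl h1
  | cons c cs =>
    simp only [List.headD_cons]
    have hc : c.isEmpty = false := by
      by_contra hx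
      exact h2 (by simp [List.any_cons, eq_true_of_ne_false hx])
    cases c with
    | nil => simp at hc
    | cons x t => simp

def convert1Dto2D_alt (state : List Int) : List (List Int) :=
  let n := state.length
  let cols := state.foldl
    (fun acc q => acc ++ [PySem.List.pySetD (List.replicate n (0 : Int)) q 1]) []
  pvZipStar cols

-- ===== PRECONDITION & SPEC =====
-- Pre_ excludes exactly the inputs on which A raises IndexError: a queen value outside [-n, n).
def Pre_convert1Dto2D (state : List Int) : Prop :=
  ∀ q ∈ state, -(state.length : Int) ≤ q ∧ q < (state.length : Int)
instance (state : List Int) : Decidable (Pre_convert1Dto2D state) := by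
  unfold Pre_convert1Dto2D; infer_instance

def pvWitness_convert1Dto2D : List Int := [1, 3, 0, 2]

def Spec_convert1Dto2D (state : List Int) (out : List (List Int)) : Prop :=
  out = convert1Dto2D_alt state
instance (state : List Int) (out : List (List Int)) : Decidable (Spec_convert1Dto2D state out) := by
  unfold Spec_convert1Dto2D; infer_instance

-- ===== CLAIM (what is proved, stated in full; the proofs are below) =====
def Claim_equal_convert1Dto2D : Prop :=
  ∀ (state : List Int), Dom_convert1Dto2D state → Pre_convert1Dto2D state →
    Spec_convert1Dto2D state (convert1Dto2D state)

-- ===== LEMMAS AND PROOFS =====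

-- Python's negative-index assignment xs[i] = v for -len ≤ i < 0 sets position i + len
theorem pvSetD_neg {α : Type} (g : List α) (q : Int) (h1 : -(g.length:Int) ≤ q) (h2 : q < 0) (v : α) :
    PySem.List.pySetD g q v = g.set (q + (g.length:Int)).toNat v := by
  simp only [PySem.List.pySetD, PySem.List.pySet?, PySem.List.pyIdx?]
  split_ifs <;> simp_all <;>
    first
      | (exfalso; omega)
      | (have h : g.length - (-q).toNat = (q + (g.length:Int)).toNat := by omega
         rw [h])

-- Python's negative-index read xs[i] for -len ≤ i < 0 reads position i + len
theorem pvGetD_neg {α : Type} (g : List α) (q : Int) (h1 : -(g.length:Int) ≤ q) (h2 : q < 0) (d : α) :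
    PySem.List.pyGetD g q d = g.getD (q + (g.length:Int)).toNat d := by
  simp only [PySem.List.pyGetD, PySem.List.pyGet?, PySem.List.pyIdx?]
  split_ifs <;> simp_all <;>
    first
      | (exfalso; omega)
      | (have h : g.length - (-q).toNat = (q + (g.length:Int)).toNat := by omega
         rw [h]; try simp [List.getD])

-- the wrapped (Python negative-indexing) row index of a queen value q, as a Nat
def pvWrap (s : List Int) (q : Int) : Nat :=
  (if q < 0 then q + (s.length : Int) else q).toNat

theorem pvSetD_wrap {α : Type} (g : List α) (s : List Int) (q : Int)
    (hl : g.length = s.length)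
    (h : -(s.length:Int) ≤ q ∧ q < (s.length:Int)) (v : α) :
    PySem.List.pySetD g q v = g.set (pvWrap s q) v := by
  unfold pvWrap
  by_cases h2 : q < 0
  · rw [pvSetD_neg g q (by omega) h2 v, hl, if_pos h2]
  · rw [PySem.List.pySetD_of_nonneg g v (by omega), if_neg h2]

theorem pvGetD_wrap {α : Type} (g : List α) (s : List Int) (q : Int)
    (hl : g.length = s.length)
    (h : -(s.length:Int) ≤ q ∧ q < (s.length:Int)) (d : α) :
    PySem.List.pyGetD g q d = g.getD (pvWrap s q) d := by
  unfold pvWrap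
  by_cases h2 : q < 0
  · rw [pvGetD_neg g q (by omega) h2 d, hl, if_pos h2]
  · rw [PySem.List.pyGetD_of_nonneg g d (by omega), if_neg h2]

-- the grid after the first k queens have been scattered:
-- cell (r, c) = 1 iff c < k and queen c (after wrapping) sits in row r
def pvGrid (s : List Int) (k : Nat) : List (List Int) :=
  (List.range s.length).map (fun r =>
    (List.range s.length).map (fun c =>
      if c < k ∧ pvWrap s (s.getD c 0) = r then (1 : Int) else 0))

theorem pvWrap_lt (s : List Int) (q : Int)
    (h : -(s.length:Int) ≤ q ∧ q < (s.length:Int)) : pvWrap s q < s.length := by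
  unfold pvWrap; split_ifs <;> omega

-- A's initial all-zero grid is pvGrid _ 0
theorem pvGrid_zero (s : List Int) :
    ((PySem.List.pyRange 0 s.length 1).map
      (fun _ => (PySem.List.pyRange 0 s.length 1).map (fun _ => (0 : Int)))) = pvGrid s 0 := by
  unfold pvGrid
  rw [PySem.List.pyRange_one]
  simp [Function.comp_def, List.map_const']

-- one iteration of A's scatter loop advances pvGrid by one column
theorem pvStep (s : List Int) (k : Nat) (hk : k < s.length)
    (hq : -(s.length : Int) ≤ s.getD k 0 ∧ s.getD k 0 < (s.length : Int)) :
    PySem.List.pySetD (pvGrid s k) (s.getD k 0)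
      (PySem.List.pySetD (PySem.List.pyGetD (pvGrid s k) (s.getD k 0) []) (k : Int) 1)
      = pvGrid s (k + 1) := by
  have hlen : (pvGrid s k).length = s.length := by simp [pvGrid]
  have hi := pvWrap_lt s (s.getD k 0) hq
  rw [pvGetD_wrap _ s _ hlen hq, pvSetD_wrap _ s _ hlen hq]
  have hrow : (pvGrid s k).getD (pvWrap s (s.getD k 0)) [] =
      (List.range s.length).map (fun c =>
        if c < k ∧ pvWrap s (s.getD c 0) = pvWrap s (s.getD k 0) then (1 : Int) else 0) := by
    simp only [pvGrid]
    rw [List.getD_eq_getElem?_getD, List.getElem?_map, List.getElem?_range hi]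
    simp
  rw [hrow, PySem.List.pySetD_of_nonneg _ _ (by omega)]
  apply List.ext_getElem
  · simp [pvGrid]
  · intro r h1 h2
    simp only [pvGrid, List.length_set, List.length_map, List.length_range] at h1 h2 ⊢
    rw [List.getElem_set]
    by_cases hr : pvWrap s (s.getD k 0) = r
    · rw [if_pos hr]
      apply List.ext_getElem
      · simp
      · intro c hc1 hc2
        simp only [List.length_set, List.length_map, List.length_range] at hc1 hc2
        rw [List.getElem_set]
        simp only [List.getElem_map, List.getElem_range]
        by_cases hck : (k:Int).toNat = c
        · rw [if_pos hck]
          have : c = k := by omega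
          subst this
          rw [if_pos ⟨by omega, hr⟩]
        · rw [if_neg hck]
          by_cases hcond : c < k ∧ pvWrap s (s.getD c 0) = r
          · rw [if_pos ⟨hcond.1, by rw [hr]; exact hcond.2⟩, if_pos ⟨by omega, hcond.2⟩]
          · rw [if_neg (by rw [hr]; exact hcond), if_neg (by
              rintro ⟨hlt, heq⟩
              exact hcond ⟨by omega, heq⟩)]
    · rw [if_neg hr]
      simp only [List.getElem_map, List.getElem_range]
      apply List.map_congr_left
      intro c hc
      have hcn : c < s.length := List.mem_range.mp hc
      by_cases hcond : c < k ∧ pvWrap s (s.getD c 0) = r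
      · rw [if_pos hcond, if_pos ⟨by omega, hcond.2⟩]
      · rw [if_neg hcond, if_neg (by
          rintro ⟨hlt, heq⟩
          rcases Nat.lt_succ_iff_lt_or_eq.mp hlt with h' | h'
          · exact hcond ⟨h', heq⟩
          · subst h'; exact hr heq)]

-- A's whole scatter loop, started after k columns, finishes the grid
theorem pvFold (s : List Int) (hpre : Pre_convert1Dto2D s) :
    ∀ (m k : Nat), m = s.length - k → k ≤ s.length →
      ((s.drop k).foldl
        (fun (acc : List (List Int) × Int) queen =>
          (PySem.List.pySetD acc.1 queen
            (PySem.List.pySetD (PySem.List.pyGetD acc.1 queen []) acc.2 1), acc.2 + 1))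
        (pvGrid s k, (k : Int))) = (pvGrid s s.length, (s.length : Int)) := by
  intro m
  induction m with
  | zero =>
    intro k hm hk
    have hks : k = s.length := by omega
    subst hks
    simp [List.drop_length]
  | succ m ih =>
    intro k hm hk
    have hk' : k < s.length := by omega
    rw [List.drop_eq_getElem_cons hk']
    simp only [List.foldl_cons]
    have hqmem : s[k] ∈ s := List.getElem_mem hk'
    have hgd : s[k] = s.getD k 0 := by simp [List.getD_eq_getElem?_getD, List.getElem?_eq_getElem hk']
    have hstep := pvStep s k hk' (by rw [← hgd]; exact hpre _ hqmem)
    rw [hgd, hstep]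
    have : ((k:Int) + 1) = ((k+1 : Nat) : Int) := by push_cast; ring
    rw [this]
    exact ih (k+1) (by omega) (by omega)

-- zip(*cols) on a nonempty rectangular family of columns (all of length m) is the m×(#cols) transpose
theorem pvZip_rect (m : Nat) : ∀ (cols : List (List Int)),
    (∀ c ∈ cols, c.length = m) → cols ≠ [] →
    pvZipStar cols = (List.range m).map (fun r => cols.map (fun c => c.getD r 0)) := by
  induction m with
  | zero =>
    intro cols hlen hne
    rw [pvZipStar, dif_pos]
    · simp
    · right
      cases cols with
      | nil => exact absurd rfl hne
      | cons c cs =>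
        simp only [List.any_cons]
        have : c.length = 0 := hlen c (by simp)
        simp [List.eq_nil_of_length_eq_zero this]
  | succ m ih =>
    intro cols hlen hne
    rw [pvZipStar, dif_neg]
    · have htails : ∀ c ∈ cols.map (fun c => c.tail), c.length = m := by
        intro c hc
        obtain ⟨c', hc', rfl⟩ := List.mem_map.mp hc
        have := hlen c' hc'
        simp [List.length_tail, this]
      have hne' : cols.map (fun c => c.tail) ≠ [] := by simpa using hne
      rw [ih _ htails hne', List.range_succ_eq_map]
      simp only [List.map_cons, List.map_map]
      congr 1
      · apply List.map_congr_left
        intro c hc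
        have : c.length = m + 1 := hlen c hc
        cases c with
        | nil => simp at this
        | cons x t => simp
      · apply List.map_congr_left
        intro r hr
        simp only [Function.comp]
        apply List.map_congr_left
        intro c hc
        cases c with
        | nil => simp
        | cons x t => simp
    · rintro (h | h)
      · exact hne h
      · simp only [List.any_eq_true] at h
        obtain ⟨c, hc, hemp⟩ := h
        have := hlen c hc
        rw [List.isEmpty_iff] at hemp
        subst hemp
        simp at this

-- B's column-building loop yields the one-hot column of each queen
theorem pvCols (s : List Int) (hpre : Pre_convert1Dto2D s) :
    s.foldl (fun acc q => acc ++ [PySem.List.pySetD (List.replicate s.length (0 : Int)) q 1]) []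
      = s.map (fun q => (List.replicate s.length (0 : Int)).set (pvWrap s q) 1) := by
  rw [PySem.List.foldl_append_singleton_eq_map]
  simp only [List.nil_append]
  apply List.map_congr_left
  intro q hq
  exact pvSetD_wrap _ s q (by simp) (hpre q hq) 1

-- the finished scatter grid is the transpose of B's one-hot columns
theorem pvGrid_full (s : List Int) (hpre : Pre_convert1Dto2D s) :
    pvGrid s s.length = convert1Dto2D_alt s := by
  unfold convert1Dto2D_alt
  simp only
  rw [pvCols s hpre]
  cases hs : s with
  | nil => simp [pvGrid, pvZipStar]
  | cons x t =>
    rw [← hs]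
    have hne : s.map (fun q => (List.replicate s.length (0 : Int)).set (pvWrap s q) 1) ≠ [] := by
      simp [hs]
    rw [pvZip_rect s.length _ (by
      intro c hc
      obtain ⟨q, hq, rfl⟩ := List.mem_map.mp hc
      simp) hne]
    unfold pvGrid
    apply List.map_congr_left
    intro r hr
    have hrn : r < s.length := List.mem_range.mp hr
    apply List.ext_getElem
    · simp
    · intro c hc1 hc2
      simp only [List.length_map, List.length_range] at hc1
      simp only [List.getElem_map, List.getElem_range]
      have hcs : c < s.length := hc1
      have hgd : s.getD c 0 = s[c] := by
        simp [List.getD_eq_getElem?_getD, List.getElem?_eq_getElem hcs]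
      rw [hgd]
      have hwl := pvWrap_lt s s[c] (hpre _ (List.getElem_mem hcs))
      rw [List.getD_eq_getElem?_getD, List.getElem?_set]
      by_cases hcond : pvWrap s s[c] = r
      · rw [if_pos ⟨hcs, hcond⟩, if_pos (by omega)]
        simp [hcond ▸ hrn]
      · rw [if_neg (fun hx => hcond hx.2), if_neg (by omega)]
        simp [hrn]

-- ===== VERDICT (by name: the statement is the Claim_ definition above) =====
theorem convert1Dto2D_spec : Claim_equal_convert1Dto2D := by
  intro s _ hpre
  unfold Spec_convert1Dto2D convert1Dto2D
  simp only
  rw [pvGrid_zero s]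
  have := pvFold s hpre s.length 0 (by omega) (by omega)
  simp only [List.drop_zero] at this
  rw [show ((0:Int)) = ((0:Nat):Int) by simp] at *
  rw [this]
  exact pvGrid_full s hpre
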